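-- pv_equiv track=rewrite | github.com/sergiorgiraldo/Python-lang | data-engineering-interview-patterns/spark/03_window_functions/ranking_and_dedup.py | dedup_latest_python
-- ===== SOURCE A (Python) =====
-- def dedup_latest_python(
--     events: list[tuple[str, str, str]],
-- ) -> list[tuple[str, str, str]]:
--     """Keep the most recent event per user using a dict.
--
--     Time:  O(n)
--     Space: O(k) where k = number of unique users
--
--     Args:
--         events: List of (user_id, event_timestamp, event_type) tuples.
--
--     Returns:
--         Deduplicated list with one row per user (the latest event).
--
--     Example:
--         >>> dedup_latest_python([
--         ...     ("u1", "2024-01-02", "click"),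
--         ...     ("u1", "2024-01-01", "view"),
--         ... ])
--         [('u1', '2024-01-02', 'click')]
--     """
--     latest: dict[str, tuple[str, str, str]] = {}
--     for user_id, ts, event_type in events:
--         if user_id not in latest or ts > latest[user_id][1]:
--             latest[user_id] = (user_id, ts, event_type)
--     return sorted(latest.values())
-- ===== SOURCE B (Python) =====
-- def dedup_latest_python(
--     events: list[tuple[str, str, str]],
-- ) -> list[tuple[str, str, str]]:
--     """Keep the most recent event per user, without a dict: collect users in
--     first-seen order, then pick each user's latest event by a linear scan."""
--     users = []
--     for user_id, _, _ in events:
--         if user_id not in users: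
--             users.append(user_id)
--     rows = []
--     for u in users:
--         group = [e for e in events if e[0] == u]
--         best = group[0]
--         for e in group[1:]:
--             if e[1] > best[1]:
--                 best = e
--         rows.append(best)
--     return sorted(rows)
-- ===== Notes on version B (the rewrite author's own statement) =====
-- stated objective: alternative
-- what changed: Replaces the single-pass dict of latest events by a dict-free decomposition: collect user_ids in first-seen order, then for each user scan the event list to pick its latest event (strict '>' keeps the first among ties), then sort.
import Mathlib
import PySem

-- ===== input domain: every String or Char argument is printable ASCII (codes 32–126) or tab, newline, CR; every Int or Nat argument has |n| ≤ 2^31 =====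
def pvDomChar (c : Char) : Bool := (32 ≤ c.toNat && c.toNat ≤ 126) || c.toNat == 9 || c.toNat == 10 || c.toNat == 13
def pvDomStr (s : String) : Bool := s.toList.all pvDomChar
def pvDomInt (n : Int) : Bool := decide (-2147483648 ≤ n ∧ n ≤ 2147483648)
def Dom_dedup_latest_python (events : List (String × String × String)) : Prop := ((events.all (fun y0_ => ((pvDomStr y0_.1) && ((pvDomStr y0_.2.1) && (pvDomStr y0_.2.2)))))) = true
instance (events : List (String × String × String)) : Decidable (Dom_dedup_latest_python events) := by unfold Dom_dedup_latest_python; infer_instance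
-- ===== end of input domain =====

-- B replaces A's single-pass dict by a dict-free decomposition (first-seen user list, one scan per user); alternative structure, not faster.

-- Python's strict '<' on 3-tuples of strings (lexicographic; String '<' is Python's str '<' per PySem);
-- shared port of the built-in sorted(xs) on triples, in the stable insertion-sort shape of
-- PySem.List.sorted_eq_foldl_insertBy (exact for Python's stable sorted).
def pvTripBefore (a b : String × String × String) : Bool :=
  decide (a.1 < b.1) || (a.1 == b.1 && (decide (a.2.1 < b.2.1) || (a.2.1 == b.2.1 && decide (a.2.2 < b.2.2))))

def pvSortTrip (xs : List (String × String × String)) : List (String × String × String) :=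
  xs.foldl (fun acc x => PySem.List.insertBy pvTripBefore x acc) []

-- ===== PORT A =====
-- loop body: if user_id not in latest or ts > latest[user_id][1]: latest[user_id] = (user_id, ts, event_type)
-- (latest[user_id] is only read when the key is present, hence the match on get?)
def pvAStep (d : PySem.Dict String (String × String × String)) (e : String × String × String) :
    PySem.Dict String (String × String × String) :=
  match d.get? e.1 with
  | none => d.insert e.1 e
  | some prev => if prev.2.1 < e.2.1 then d.insert e.1 e else d

def dedup_latest_python (events : List (String × String × String)) : List (String × String × String) :=
  pvSortTrip ((events.foldl pvAStep PySem.Dict.empty).values)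

-- ===== PORT B =====
-- users: 'if user_id not in users: users.append(user_id)' over the events
def pvBUsers (events : List (String × String × String)) : List String :=
  events.foldl (fun us e => if e.1 ∈ us then us else us ++ [e.1]) []

-- group = [e for e in events if e[0] == u]; best = group[0]; for e in group[1:]: if e[1] > best[1]: best = e
-- (the [] branch is unreachable: every u in pvBUsers occurs in events)
def pvBBest (events : List (String × String × String)) (u : String) : String × String × String :=
  match events.filter (fun e => e.1 == u) with
  | [] => (u, "", "")
  | g0 :: gs => gs.foldl (fun best e => if best.2.1 < e.2.1 then e else best) g0

def dedup_latest_python_alt (events : List (String × String × String)) : List (String × String × String) :=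
  pvSortTrip ((pvBUsers events).map (pvBBest events))

-- ===== PRECONDITION & SPEC =====
def Spec_dedup_latest_python (events : List (String × String × String)) (out : List (String × String × String)) : Prop := out = dedup_latest_python_alt events
instance (events : List (String × String × String)) (out : List (String × String × String)) : Decidable (Spec_dedup_latest_python events out) := by unfold Spec_dedup_latest_python; infer_instance

-- ===== CLAIM (what is proved, stated in full; the proofs are below) =====
def Claim_equal_dedup_latest_python : Prop := ∀ (events : List (String × String × String)), Dom_dedup_latest_python events → Spec_dedup_latest_python events (dedup_latest_python events)

-- ===== LEMMAS AND PROOFS =====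

-- one dict step of A, observed through get? at a fixed key
def pvStep1 (o : Option (String × String × String)) (e : String × String × String) :
    Option (String × String × String) :=
  match o with
  | none => some e
  | some prev => if prev.2.1 < e.2.1 then some e else some prev

theorem pv_foldl_step1_some (gs : List (String × String × String)) (b : String × String × String) :
    gs.foldl pvStep1 (some b) = some (gs.foldl (fun best e => if best.2.1 < e.2.1 then e else best) b) := by
  induction gs generalizing b with
  | nil => rfl
  | cons e gs ih =>
      simp only [List.foldl_cons, pvStep1]
      split_ifs <;> exact ih _

theorem pv_get?_step (d : PySem.Dict String (String × String × String))
    (e : String × String × String) (u : String) :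
    (pvAStep d e).get? u = if e.1 = u then pvStep1 (d.get? u) e else d.get? u := by
  unfold pvAStep
  by_cases h : e.1 = u
  · subst h
    cases hg : d.get? e.1 with
    | none => simp [pvStep1, PySem.Dict.get?_insert_self]
    | some prev =>
        simp only [pvStep1]
        split_ifs <;> simp [hg, PySem.Dict.get?_insert_self]
  · have hne : u ≠ e.1 := fun hc => h hc.symm
    cases hg : d.get? e.1 with
    | none => simp [h, PySem.Dict.get?_insert_of_ne _ _ hne]
    | some prev =>
        rw [if_neg h]
        dsimp only
        split_ifs
        · exact PySem.Dict.get?_insert_of_ne _ _ hne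
        · rfl

-- A's dict at key u is the pvStep1-fold over the events whose user is u
theorem pv_get?_foldl (es : List (String × String × String))
    (d : PySem.Dict String (String × String × String)) (u : String) :
    (es.foldl pvAStep d).get? u = (es.filter (fun e => e.1 == u)).foldl pvStep1 (d.get? u) := by
  induction es generalizing d with
  | nil => rfl
  | cons e es ih =>
      simp only [List.foldl_cons, List.filter_cons]
      by_cases h : e.1 = u
      · simp only [h, beq_self_eq_true, if_pos, List.foldl_cons]
        rw [ih, pv_get?_step, if_pos h]
      · have hb : (e.1 == u) = false := by simp [h]
        simp only [hb, Bool.false_eq_true, if_neg, not_false_iff]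
        rw [ih, pv_get?_step, if_neg h]

theorem pv_keys_step (d : PySem.Dict String (String × String × String))
    (e : String × String × String) :
    (pvAStep d e).keys = if e.1 ∈ d.keys then d.keys else d.keys ++ [e.1] := by
  unfold pvAStep
  cases hg : d.get? e.1 with
  | none =>
      have hc : d.contains e.1 = false := (PySem.Dict.get?_eq_none_iff_contains d e.1).mp hg
      have hm : e.1 ∉ d.keys := (PySem.Dict.get?_eq_none_iff_not_mem_keys d e.1).mp hg
      simp [hm, PySem.Dict.keys_insert_of_not_contains d e hc]
  | some prev =>
      have hc : d.contains e.1 = true := by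
        rw [PySem.Dict.contains_eq_isSome_get?, hg]; rfl
      have hm : e.1 ∈ d.keys := (PySem.Dict.contains_iff_mem_keys d e.1).mp hc
      dsimp only
      split_ifs <;> simp [PySem.Dict.keys_insert_of_contains d e hc]

-- A's dict keys are the first-seen distinct users
theorem pv_keys_foldl (es : List (String × String × String))
    (d : PySem.Dict String (String × String × String)) :
    (es.foldl pvAStep d).keys = PySem.Set.update d.keys (es.map (·.1)) := by
  induction es generalizing d with
  | nil => rfl
  | cons e es ih =>
      simp only [List.foldl_cons, List.map_cons, PySem.Set.update_cons, ih, pv_keys_step]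
      congr 1
      rw [PySem.Set.add_eq_ite]

theorem pv_bUsers_eq (events : List (String × String × String)) :
    pvBUsers events = PySem.Set.ofList (events.map (·.1)) := by
  unfold pvBUsers
  rw [← PySem.Set.update_empty, PySem.Set.update_map_eq_foldl_add]
  have hfe : (fun (s : PySem.Set String) (e : String × String × String) => s.add e.1)
      = fun us e => if e.1 ∈ us then us else us ++ [e.1] := by
    funext s e; rw [PySem.Set.add_eq_ite]
  rw [hfe]
  rfl

-- the unsorted lists of kept rows coincide (same users in first-seen order, same chosen row per user)
theorem pv_main (events : List (String × String × String)) :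
    (events.foldl pvAStep PySem.Dict.empty).values
      = (PySem.Set.ofList (events.map (·.1))).map (pvBBest events) := by
  have hkeys : (events.foldl pvAStep PySem.Dict.empty).keys = PySem.Set.ofList (events.map (·.1)) := by
    rw [pv_keys_foldl, PySem.Dict.keys_empty, PySem.Set.update_nil_left]
  have hnd : (events.foldl pvAStep PySem.Dict.empty).keys.Nodup := by
    rw [hkeys]; exact PySem.Set.nodup_ofList _
  rw [PySem.Dict.values_eq_map_keys _ hnd ("", "", ""), hkeys]
  apply List.map_congr_left
  intro u hu
  have hu' : u ∈ events.map (·.1) := (PySem.Set.mem_ofList _ _).mp hu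
  obtain ⟨e, he, hfe⟩ := List.mem_map.mp hu'
  have hmem : e ∈ events.filter (fun e => e.1 == u) := by
    rw [List.mem_filter]; exact ⟨he, by simp [hfe]⟩
  rw [PySem.Dict.getD_eq_get?_getD, pv_get?_foldl, PySem.Dict.get?_empty]
  cases hf : events.filter (fun e => e.1 == u) with
  | nil => rw [hf] at hmem; cases hmem
  | cons g0 gs =>
      rw [List.foldl_cons]
      have h1 : pvStep1 none g0 = some g0 := rfl
      have hb : pvBBest events u
          = gs.foldl (fun best e => if best.2.1 < e.2.1 then e else best) g0 := by
        rw [pvBBest.eq_def]; rw [hf]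
      rw [h1, pv_foldl_step1_some, hb]
      rfl

-- ===== VERDICT (by name: the statement is the Claim_ definition above) =====
theorem dedup_latest_python_spec : Claim_equal_dedup_latest_python := by
  intro events _
  unfold Spec_dedup_latest_python dedup_latest_python dedup_latest_python_alt
  rw [pv_main, pv_bUsers_eq]
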